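-- pv_equiv track=rewrite | github.com/yuqi-lee/VFScheduling | utils/lstm.py | count_large_intervals
-- ===== SOURCE A (Python) =====
-- def count_large_intervals(list1, list2):
--     if len(list1) != len(list2):
--         raise ValueError("length is not equal.")
--
--     count = 0
--     in_interval = False
--     interval_length = 0
--
--     for i in range(len(list1)):
--         if list2[i] < list1[i] - 50:  # 判断是否小于100
--             if not in_interval:
--                 in_interval = True
--                 interval_length = 1  # 开始新的区间
--             else:
--                 interval_length += 1  # 增加当前区间的长度
--         else:
--             if in_interval:
--                 if interval_length > 10:
--                     count += 1  # 结束区间且长度大于10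
--                 in_interval = False
--                 interval_length = 0  # 重置区间长度
--
--     # 检查最后一个区间
--     if in_interval and interval_length > 10:
--         count += 1
--
--     return count
-- ===== SOURCE B (Python) =====
-- def count_large_intervals(list1, list2):
--     if len(list1) != len(list2):
--         raise ValueError("length is not equal.")
--     conds = [list2[i] < list1[i] - 50 for i in range(len(list1))]
--
--     def windows(k):
--         # number of positions where k consecutive entries of conds are all True
--         return sum(1 for i in range(len(conds) - k + 1) if all(conds[i:i+k]))
--
--     # a run of length L contributes L-10 windows of size 11 and L-11 windows of
--     # size 12 when L >= 11, and 0 of each when L <= 10; so the difference counts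
--     # exactly the runs of length > 10.
--     return windows(11) - windows(12)
-- ===== Notes on version B (the rewrite author's own statement) =====
-- stated objective: alternative
-- what changed: Replaces A's run-tracking state machine by a window-counting identity: the number of runs longer than 10 equals (number of all-True windows of size 11) minus (number of all-True windows of size 12) over the precomputed predicate list.
import Mathlib
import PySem

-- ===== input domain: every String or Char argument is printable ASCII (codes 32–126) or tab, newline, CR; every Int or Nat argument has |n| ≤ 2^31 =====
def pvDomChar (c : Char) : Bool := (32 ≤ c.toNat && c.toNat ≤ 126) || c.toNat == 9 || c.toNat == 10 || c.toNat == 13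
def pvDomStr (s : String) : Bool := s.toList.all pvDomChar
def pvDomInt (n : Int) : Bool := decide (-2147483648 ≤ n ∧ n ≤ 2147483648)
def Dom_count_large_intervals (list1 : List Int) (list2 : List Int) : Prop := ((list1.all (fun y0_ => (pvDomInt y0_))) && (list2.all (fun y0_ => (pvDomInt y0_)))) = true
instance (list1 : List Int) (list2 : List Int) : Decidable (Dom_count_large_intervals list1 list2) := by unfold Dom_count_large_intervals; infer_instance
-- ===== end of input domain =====

-- B replaces A's run-tracking state machine by the window identity: runs longer than 10
-- = (all-True windows of size 11) - (all-True windows of size 12); alternative, not faster.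

-- ===== PORT A =====
-- literal port of A's loop: state (count, in_interval, interval_length)
def count_large_intervals (list1 : List Int) (list2 : List Int) : Int :=
  let st := (PySem.List.pyRange 0 list1.length 1).foldl
    (fun (s : Int × Bool × Int) i =>
      if PySem.List.pyGetD list2 i 0 < PySem.List.pyGetD list1 i 0 - 50 then
        if !s.2.1 then (s.1, true, 1)
        else (s.1, s.2.1, s.2.2 + 1)
      else
        if s.2.1 then ((if s.2.2 > 10 then s.1 + 1 else s.1), false, 0)
        else s)
    (0, false, 0)
  if st.2.1 ∧ st.2.2 > 10 then st.1 + 1 else st.1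

-- ===== PORT B =====
-- windows(k) of Source B: sum(1 for i in range(len(conds)-k+1) if all(conds[i:i+k]))
def pvWindows (conds : List Bool) (k : Int) : Int :=
  (PySem.List.pyRange 0 ((conds.length : Int) - k + 1) 1).foldl
    (fun acc i =>
      if (PySem.List.slice conds (some i) (some (i + k))).all id then acc + 1 else acc) 0

def count_large_intervals_alt (list1 : List Int) (list2 : List Int) : Int :=
  let conds := (PySem.List.pyRange 0 list1.length 1).map
    (fun i => decide (PySem.List.pyGetD list2 i 0 < PySem.List.pyGetD list1 i 0 - 50))
  pvWindows conds 11 - pvWindows conds 12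

-- ===== PRECONDITION & SPEC =====
-- A raises ValueError when the lengths differ; B raises there too.
def Pre_count_large_intervals (list1 : List Int) (list2 : List Int) : Prop :=
  list1.length = list2.length
instance (list1 : List Int) (list2 : List Int) : Decidable (Pre_count_large_intervals list1 list2) := by unfold Pre_count_large_intervals; infer_instance
def pvWitness_count_large_intervals : List Int × List Int := ([100, 0], [0, 0])

def Spec_count_large_intervals (list1 : List Int) (list2 : List Int) (out : Int) : Prop := out = count_large_intervals_alt list1 list2
instance (list1 : List Int) (list2 : List Int) (out : Int) : Decidable (Spec_count_large_intervals list1 list2 out) := by unfold Spec_count_large_intervals; infer_instance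

-- ===== CLAIM (what is proved, stated in full; the proofs are below) =====
def Claim_equal_count_large_intervals : Prop := ∀ (list1 : List Int) (list2 : List Int), Dom_count_large_intervals list1 list2 → Pre_count_large_intervals list1 list2 → Spec_count_large_intervals list1 list2 (count_large_intervals list1 list2)

-- ===== LEMMAS AND PROOFS =====

-- A's loop body, abstracted over the boolean already computed
def pvStep (s : Int × Bool × Int) (b : Bool) : Int × Bool × Int :=
  if b then
    if !s.2.1 then (s.1, true, 1) else (s.1, s.2.1, s.2.2 + 1)
  else
    if s.2.1 then ((if s.2.2 > 10 then s.1 + 1 else s.1), false, 0) else s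

def pvFin (s : Int × Bool × Int) : Int :=
  if s.2.1 ∧ s.2.2 > 10 then s.1 + 1 else s.1

-- proof-side intermediate: count of maximal True-runs of length > 10
def pvCountRuns : List Bool → Int
  | [] => 0
  | b :: rest =>
    (if b ∧ (1 + (rest.takeWhile (· == b)).length : Int) > 10 then 1 else 0)
      + pvCountRuns (rest.dropWhile (· == b))
termination_by l => l.length
decreasing_by
  simp only [List.length_cons]
  exact Nat.lt_succ_of_le (List.length_dropWhile_le _ _)

lemma pvCountRuns_cons (b : Bool) (rest : List Bool) :
    pvCountRuns (b :: rest) =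
      (if b ∧ (1 + (rest.takeWhile (· == b)).length : Int) > 10 then 1 else 0)
        + pvCountRuns (rest.dropWhile (· == b)) := by
  rw [pvCountRuns]

lemma pvCountRuns_dropFalse (t : List Bool) :
    pvCountRuns (t.dropWhile (· == false)) = pvCountRuns t := by
  cases t with
  | nil => simp
  | cons b s =>
    cases b with
    | false => simp [pvCountRuns_cons, List.dropWhile]
    | true => simp [List.dropWhile]

lemma pvMain (conds : List Bool) :
    (∀ c : Int, pvFin (conds.foldl pvStep (c, false, 0)) = c + pvCountRuns conds) ∧
    (∀ (c L : Int), 1 ≤ L →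
      pvFin (conds.foldl pvStep (c, true, L)) =
        c + (if L + ((conds.takeWhile (· == true)).length : Int) > 10 then 1 else 0)
          + pvCountRuns (conds.dropWhile (· == true))) := by
  induction conds with
  | nil =>
    constructor
    · intro c; simp [pvFin, pvCountRuns]
    · intro c L hL; simp [pvFin, pvCountRuns]; split_ifs <;> ring
  | cons b t ih =>
    obtain ⟨ihF, ihT⟩ := ih
    constructor
    · intro c
      cases b with
      | false =>
        have : pvStep (c, false, 0) false = (c, false, 0) := by simp [pvStep]
        rw [List.foldl_cons, this, ihF c, pvCountRuns_cons, pvCountRuns_dropFalse]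
        simp
      | true =>
        have : pvStep (c, false, 0) true = (c, true, 1) := by simp [pvStep]
        rw [List.foldl_cons, this, ihT c 1 le_rfl, pvCountRuns_cons]
        simp only [true_and, add_assoc]
    · intro c L hL
      cases b with
      | false =>
        have : pvStep (c, true, L) false = ((if L > 10 then c + 1 else c), false, 0) := by
          simp [pvStep]
        rw [List.foldl_cons, this, ihF]
        have hdrop : (false :: t).dropWhile (· == true) = false :: t := by
          simp [List.dropWhile]
        have htake : (false :: t).takeWhile (· == true) = [] := by
          simp [List.takeWhile]
        rw [hdrop, htake, pvCountRuns_cons, pvCountRuns_dropFalse]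
        simp only [List.length_nil, Nat.cast_zero, add_zero, Bool.false_eq_true, false_and, if_false, zero_add]
        split_ifs <;> ring
      | true =>
        have : pvStep (c, true, L) true = (c, true, L + 1) := by simp [pvStep]
        rw [List.foldl_cons, this, ihT c (L + 1) (by omega)]
        have htake : (true :: t).takeWhile (· == true) = true :: t.takeWhile (· == true) := by
          simp [List.takeWhile]
        have hdrop : (true :: t).dropWhile (· == true) = t.dropWhile (· == true) := by
          simp [List.dropWhile]
        rw [htake, hdrop]
        simp only [List.length_cons]
        push_cast
        split_ifs <;> (first | (exfalso; omega) | ring)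

-- structural version of windows(k)
def pvWk (k : Nat) : List Bool → Int
  | [] => 0
  | b :: t => (if k ≤ (b :: t).length ∧ ((b :: t).take k).all id then 1 else 0) + pvWk k t

lemma pvWk_short (k : Nat) (t : List Bool) (h : t.length < k) : pvWk k t = 0 := by
  induction t with
  | nil => simp [pvWk]
  | cons b s ih =>
    simp only [List.length_cons] at h
    rw [pvWk, ih (by omega)]
    have hn : ¬ (k ≤ (b :: s).length ∧ ((b :: s).take k).all id = true) := by
      intro hc
      have := hc.1
      simp only [List.length_cons] at this
      omega
    rw [if_neg hn]
    simp

lemma pvWk_false (k : Nat) (hk : 1 ≤ k) (t : List Bool) :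
    pvWk k (false :: t) = pvWk k t := by
  cases k with
  | zero => omega
  | succ k' =>
    rw [pvWk]
    have hn : ¬ (k' + 1 ≤ (false :: t).length ∧ ((false :: t).take (k' + 1)).all id = true) := by
      intro hc
      have := hc.2
      simp [List.take_succ_cons] at this
    rw [if_neg hn, zero_add]

lemma pvWk_dropFalse (k : Nat) (hk : 1 ≤ k) (t : List Bool) :
    pvWk k (t.dropWhile (· == false)) = pvWk k t := by
  induction t with
  | nil => simp
  | cons b s ih =>
    cases b with
    | false => rw [List.dropWhile_cons_of_pos (by simp), ih, pvWk_false k hk]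
    | true => rw [List.dropWhile_cons_of_neg (by simp)]

lemma pvWk_run (k : Nat) (hk : 1 ≤ k) (m : Nat) (q : List Bool)
    (hq : q = [] ∨ q.head? = some false) :
    pvWk k (List.replicate m true ++ q) =
      (if k ≤ m then ((m : Int) - k + 1) else 0) + pvWk k q := by
  induction m with
  | zero => simp; omega
  | succ m ih =>
    have hrep : List.replicate (m + 1) true ++ q = true :: (List.replicate m true ++ q) := by
      simp [List.replicate_succ]
    rw [hrep, pvWk, ih]
    have hind : (if k ≤ (true :: (List.replicate m true ++ q)).length ∧
        ((true :: (List.replicate m true ++ q)).take k).all id then 1 else 0)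
        = (if k ≤ m + 1 then (1 : Int) else 0) := by
      by_cases hkm : k ≤ m + 1
      · have hlen : k ≤ (true :: (List.replicate m true ++ q)).length := by
          simp [List.length_append]; omega
        have htake : (true :: (List.replicate m true ++ q)).take k
            = List.replicate k true := by
          have : true :: (List.replicate m true ++ q)
              = List.replicate (m + 1) true ++ q := hrep.symm
          rw [this, List.take_append_of_le_length (by simpa using hkm),
            List.take_replicate]
          congr 1; omega
        rw [if_pos ⟨hlen, by simp [htake]⟩, if_pos hkm]
      · -- k > m+1: either too long, or the window reaches the false head of q
        rcases hq with rfl | hhead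
        · have hn : ¬ (k ≤ (true :: (List.replicate m true ++ ([] : List Bool))).length ∧
              ((true :: (List.replicate m true ++ ([] : List Bool))).take k).all id = true) := by
            intro hc
            have := hc.1
            simp at this
            omega
          rw [if_neg hn, if_neg hkm]
        · obtain ⟨q0, q', rfl⟩ : ∃ q0 q', q = q0 :: q' := by
            cases q with
            | nil => simp at hhead
            | cons a b => exact ⟨a, b, rfl⟩
          have hq0 : q0 = false := by simpa using hhead
          subst hq0
          have hfalse : false ∈ (true :: (List.replicate m true ++ (false :: q'))).take k := by
            have hidx : (true :: (List.replicate m true ++ (false :: q')))[m + 1]? = some false := by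
              rw [List.getElem?_cons_succ, List.getElem?_append_right (by simp)]
              simp
            have hlt := List.getElem?_take_of_lt
              (l := true :: (List.replicate m true ++ (false :: q'))) (i := m + 1) (j := k) (by omega)
            rw [hidx] at hlt
            exact List.mem_of_getElem? hlt
          have hn : ¬ (k ≤ (true :: (List.replicate m true ++ (false :: q'))).length ∧
              ((true :: (List.replicate m true ++ (false :: q'))).take k).all id = true) := by
            intro hc
            have := List.all_eq_true.mp hc.2 _ hfalse
            simp at this
          rw [if_neg hn, if_neg hkm]
    rw [hind]
    have harith : (if k ≤ m + 1 then (1 : Int) else 0) + (if k ≤ m then ((m : Int) - k + 1) else 0)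
        = (if k ≤ m + 1 then (((m + 1 : Nat) : Int) - k + 1) else 0) := by
      split_ifs <;> push_cast <;> omega
    rw [← add_assoc, harith]

-- run count = W11 - W12
lemma pvRuns_eq_windows (t : List Bool) :
    pvCountRuns t = pvWk 11 t - pvWk 12 t := by
  induction t using pvCountRuns.induct with
  | case1 => simp [pvCountRuns, pvWk]
  | case2 b rest ih =>
    rw [pvCountRuns_cons, ih]
    cases b with
    | false =>
      rw [pvWk_dropFalse 11 (by omega) rest, pvWk_dropFalse 12 (by omega) rest,
        pvWk_false 11 (by omega), pvWk_false 12 (by omega)]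
      simp
    | true =>
      set p := rest.takeWhile (· == true) with hp
      set q := rest.dropWhile (· == true) with hq
      have hrest : rest = p ++ q := (List.takeWhile_append_dropWhile).symm
      have hrep : p = List.replicate p.length true := by
        apply List.eq_replicate_of_mem
        intro x hx
        have := List.mem_takeWhile_imp (hp ▸ hx)
        simpa using this
      have hcons : true :: rest = List.replicate (p.length + 1) true ++ q := by
        rw [hrest, hrep]; simp [List.replicate_succ]
      have hqh : q = [] ∨ q.head? = some false := by
        cases hq' : q with
        | nil => exact Or.inl rfl
        | cons a q' =>
          right
          have := List.head?_dropWhile_not (p := (· == false)) rest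
          have h2 : ¬ (a == true) = true := by
            have := List.head?_dropWhile_not (p := (· == true)) rest
            rw [← hq, hq'] at this
            simpa using this
          cases a with
          | false => simp
          | true => simp at h2
      rw [hcons, pvWk_run 11 (by omega) _ q hqh, pvWk_run 12 (by omega) _ q hqh]
      have hL : (1 + (p.length : Int) > 10) ↔ (11 ≤ p.length + 1) := by omega
      by_cases hc : 11 ≤ p.length + 1 <;> by_cases hc2 : 12 ≤ p.length + 1 <;>
        simp [hc, hc2, hL] <;> first | omega | (push_cast; ring_nf; omega)

-- bridge: the range/slice fold of the port equals the structural pvWk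
lemma pvWindows_eq_count (k : Nat) (_hk : 1 ≤ k) (conds : List Bool) :
    pvWindows conds (k : Int) =
      (((List.range (conds.length + 1 - k)).countP
        (fun j => ((conds.drop j).take k).all id) : Nat) : Int) := by
  unfold pvWindows
  rw [PySem.List.pyRange_one]
  have htn : ((((conds.length : Int)) - k + 1) - 0).toNat = conds.length + 1 - k := by omega
  rw [htn, PySem.List.foldl_if_add_one, List.countP_map, zero_add]
  congr 1
  apply List.countP_congr
  intro j hj
  simp only [Function.comp_def, zero_add]
  have e : ((j : Nat) : Int) + ((k : Nat) : Int) = ((j + k : Nat) : Int) := by push_cast; ring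
  rw [e, PySem.List.slice_natCast, Nat.add_sub_cancel_left]

lemma pvCount_eq_pvWk (k : Nat) (hk : 1 ≤ k) (conds : List Bool) :
    (((List.range (conds.length + 1 - k)).countP
      (fun j => ((conds.drop j).take k).all id) : Nat) : Int) = pvWk k conds := by
  induction conds with
  | nil =>
    have h0 : ([] : List Bool).length + 1 - k = 0 := by
      simp only [List.length_nil]; omega
    rw [h0]
    simp [pvWk]
  | cons b t ih =>
    by_cases hlen : k ≤ t.length + 1
    · have hm : (b :: t).length + 1 - k = (t.length + 1 - k) + 1 := by
        simp only [List.length_cons]; omega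
      rw [hm, List.range_succ_eq_map, List.countP_cons, List.countP_map]
      have hcomp : ((fun j => (((b :: t).drop j).take k).all id) ∘ Nat.succ)
          = (fun j => ((t.drop j).take k).all id) := by
        funext j; rfl
      rw [hcomp, pvWk, ← ih]
      have hind : (if k ≤ (b :: t).length ∧ ((b :: t).take k).all id then (1 : Int) else 0)
          = (if ((b :: t).take k).all id then (1 : Int) else 0) := by
        by_cases h : ((b :: t).take k).all id = true
        · rw [if_pos h, if_pos ⟨by simp only [List.length_cons]; omega, h⟩]
        · rw [if_neg h, if_neg (fun hc => h hc.2)]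
      rw [hind]
      by_cases h : (((b :: t).drop 0).take k).all id = true
      · have h' : ((b :: t).take k).all id = true := h
        rw [if_pos h, if_pos h']
        push_cast
        ring
      · have h' : ¬ ((b :: t).take k).all id = true := h
        rw [if_neg h, if_neg h']
        push_cast
        ring
    · have hm : (b :: t).length + 1 - k = 0 := by
        simp only [List.length_cons]; omega
      rw [hm, pvWk_short k (b :: t) (by simp only [List.length_cons]; omega)]
      simp

lemma pvWindows_eq_pvWk (k : Nat) (hk : 1 ≤ k) (conds : List Bool) :
    pvWindows conds (k : Int) = pvWk k conds :=
  (pvWindows_eq_count k hk conds).trans (pvCount_eq_pvWk k hk conds)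

-- ===== VERDICT (by name: the statement is the Claim_ definition above) =====
theorem count_large_intervals_spec : Claim_equal_count_large_intervals := by
  intro list1 list2 _ _
  unfold Spec_count_large_intervals count_large_intervals count_large_intervals_alt
  have hb : (fun (s : Int × Bool × Int) (i : Int) =>
      if PySem.List.pyGetD list2 i 0 < PySem.List.pyGetD list1 i 0 - 50 then
        if !s.2.1 then (s.1, true, 1) else (s.1, s.2.1, s.2.2 + 1)
      else if s.2.1 then ((if s.2.2 > 10 then s.1 + 1 else s.1), false, 0) else s)
    = fun s i => pvStep s (decide (PySem.List.pyGetD list2 i 0 < PySem.List.pyGetD list1 i 0 - 50)) := by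
    funext s i
    by_cases h : PySem.List.pyGetD list2 i 0 < PySem.List.pyGetD list1 i 0 - 50 <;>
      simp [pvStep, h]
  simp only [hb, ← List.foldl_map]
  have h2 := (pvMain ((PySem.List.pyRange 0 list1.length 1).map
    (fun i => decide (PySem.List.pyGetD list2 i 0 < PySem.List.pyGetD list1 i 0 - 50)))).1 0
  rw [zero_add] at h2
  rw [pvRuns_eq_windows, ← pvWindows_eq_pvWk 11 (by omega), ← pvWindows_eq_pvWk 12 (by omega)] at h2
  norm_num at h2 ⊢
  exact h2
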